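-- pv_equiv track=rewrite | github.com/h-dragon93/Algorithm_with_Python | practice.py | solution
-- ===== SOURCE A (Python) =====
-- def solution(goods, boxes):
--     goods = sorted(goods)
--     boxes = sorted(boxes)
--     li = []
--     k = 0
--     for i in range(len(goods)) :
--         for j in range(k, len(boxes)) :
--             if goods[i] <= boxes[j] :
--                 li.append(goods[i])
--                 k = j+1
--                 break
--
--     return len(li)
-- ===== SOURCE B (Python) =====
-- def solution(goods, boxes):
--     gs = sorted(goods)
--     cnt = 0
--     for b in sorted(boxes):
--         if cnt < len(gs) and gs[cnt] <= b:
--             cnt += 1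
--     return cnt
-- ===== Notes on version B (the rewrite author's own statement) =====
-- stated objective: alternative
-- what changed: B iterates once over the sorted boxes with a single counter that doubles as a pointer into the sorted goods, removing A's inner box scan (which rescans the remaining boxes for every unmatchable good); asymptotically better worst case, but not consistently measured faster.
import Mathlib
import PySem

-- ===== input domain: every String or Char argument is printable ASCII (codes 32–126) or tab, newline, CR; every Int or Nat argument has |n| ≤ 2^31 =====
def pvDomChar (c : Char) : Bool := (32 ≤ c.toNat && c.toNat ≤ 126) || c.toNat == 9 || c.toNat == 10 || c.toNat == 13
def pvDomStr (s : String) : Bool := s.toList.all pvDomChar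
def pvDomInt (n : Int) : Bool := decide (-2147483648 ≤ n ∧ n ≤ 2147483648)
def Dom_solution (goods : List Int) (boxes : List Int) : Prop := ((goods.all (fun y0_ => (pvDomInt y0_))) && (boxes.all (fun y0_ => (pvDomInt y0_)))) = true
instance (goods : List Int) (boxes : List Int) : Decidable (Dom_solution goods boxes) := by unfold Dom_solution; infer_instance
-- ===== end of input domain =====

-- B replaces A's nested good/box scan by a single pass over the sorted boxes with one
-- counter-pointer into the sorted goods (objective: alternative; the inner rescan disappears).


-- ===== PORT A =====
-- inner loop: "for j in range(k, len(boxes)): if goods[i] <= boxes[j]: ...; break"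
-- returns the j it breaks at (none = loop finished without break)
def findFrom (g : Int) (bs : List Int) (j : Nat) : Option Nat :=
  if h : j < bs.length then
    if g ≤ bs[j] then some j else findFrom g bs (j + 1)
  else none
termination_by bs.length - j

def solution (goods : List Int) (boxes : List Int) : Int :=
  ((((PySem.List.sorted goods (fun x => x) false).foldl (fun (st : List Int × Nat) g =>
    match findFrom g (PySem.List.sorted boxes (fun x => x) false) st.2 with
    | some j => (st.1 ++ [g], j + 1)
    | none => st) ([], 0)).1.length : Nat) : Int)

-- ===== PORT B =====
def solution_alt (goods : List Int) (boxes : List Int) : Int :=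
  (((PySem.List.sorted boxes (fun x => x) false).foldl
    (fun (cnt : Nat) b =>
      if h : cnt < (PySem.List.sorted goods (fun x => x) false).length then
        if (PySem.List.sorted goods (fun x => x) false)[cnt] ≤ b then cnt + 1 else cnt
      else cnt) 0 : Nat) : Int)

-- ===== PRECONDITION & SPEC =====
def Spec_solution (goods : List Int) (boxes : List Int) (out : Int) : Prop := out = solution_alt goods boxes
instance (goods : List Int) (boxes : List Int) (out : Int) : Decidable (Spec_solution goods boxes out) := by unfold Spec_solution; infer_instance

-- ===== CLAIM (what is proved, stated in full; the proofs are below) =====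
def Claim_equal_solution : Prop := ∀ (goods : List Int) (boxes : List Int), Dom_solution goods boxes → Spec_solution goods boxes (solution goods boxes)

-- ===== LEMMAS AND PROOFS =====

-- common abstract greedy: smallest box b, smallest good g; if g ≤ b match both, else discard b
def greedy : List Int → List Int → Nat
  | _, [] => 0
  | [], _ :: _ => 0
  | g :: gs, b :: bs => if g ≤ b then 1 + greedy gs bs else greedy (g :: gs) bs

theorem greedy_nil_left (bs : List Int) : greedy [] bs = 0 := by
  cases bs <;> rfl

theorem greedy_nil_right (gs : List Int) : greedy gs [] = 0 := by
  cases gs <;> rfl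

-- B's fold computes greedy on the goods suffix from the counter
theorem alt_fold_eq_greedy (gs : List Int) (bs : List Int) (cnt : Nat) :
    bs.foldl (fun (cnt : Nat) b =>
      if h : cnt < gs.length then
        if gs[cnt] ≤ b then cnt + 1 else cnt
      else cnt) cnt = cnt + greedy (gs.drop cnt) bs := by
  induction bs generalizing cnt with
  | nil => simp [greedy]
  | cons b bs ih =>
    by_cases h : cnt < gs.length
    · have hdrop : gs.drop cnt = gs[cnt] :: gs.drop (cnt + 1) :=
        List.drop_eq_getElem_cons h
      by_cases hle : gs[cnt] ≤ b
      · simp only [List.foldl_cons, dif_pos h, ih, hdrop, greedy, if_pos hle]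
        omega
      · simp only [List.foldl_cons, dif_pos h, ih, hdrop, greedy, if_neg hle]
    · have hdrop : gs.drop cnt = [] := List.drop_eq_nil_of_le (by omega)
      simp only [List.foldl_cons, dif_neg h, ih, hdrop, greedy_nil_left]

-- findFrom facts
theorem findFrom_none_lt (g : Int) (bs : List Int) (j : Nat)
    (hnone : findFrom g bs j = none) :
    ∀ t, j ≤ t → (h : t < bs.length) → bs[t] < g := by
  intro t hjt ht
  induction hj : bs.length - j generalizing j with
  | zero =>
    rw [findFrom] at hnone
    rw [dif_neg (by omega)] at hnone
    omega
  | succ n ih =>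
    rw [findFrom] at hnone
    rw [dif_pos (by omega)] at hnone
    split at hnone
    · exact absurd hnone (by simp)
    · rename_i hlt
      rcases Nat.eq_or_lt_of_le hjt with rfl | hlt2
      · omega
      · exact ih (j + 1) hnone (by omega) (by omega)

theorem findFrom_some (g : Int) (bs : List Int) (j i : Nat)
    (hsome : findFrom g bs j = some i) :
    j ≤ i ∧ ∃ h : i < bs.length, g ≤ bs[i] ∧
      ∀ t, j ≤ t → t < i → (h' : t < bs.length) → bs[t] < g := by
  induction hj : bs.length - j generalizing j with
  | zero =>
    rw [findFrom, dif_neg (by omega)] at hsome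
    exact absurd hsome (by simp)
  | succ n ih =>
    rw [findFrom, dif_pos (by omega)] at hsome
    split at hsome
    · rename_i hle
      cases hsome
      exact ⟨le_refl _, by omega, hle, fun t h1 h2 _ => by omega⟩
    · rename_i hgt
      obtain ⟨h1, h2, h3, h4⟩ := ih (j + 1) hsome (by omega)
      refine ⟨by omega, h2, h3, fun t ht1 ht2 ht3 => ?_⟩
      rcases Nat.eq_or_lt_of_le ht1 with rfl | ht4
      · omega
      · exact h4 t (by omega) ht2 ht3

-- discarding boxes smaller than the head good does not change greedy
theorem greedy_drop_small (g : Int) (gs bs : List Int) (k j : Nat)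
    (hkj : k ≤ j) (hjlen : j ≤ bs.length)
    (hsmall : ∀ t, k ≤ t → t < j → (h : t < bs.length) → bs[t] < g) :
    greedy (g :: gs) (bs.drop k) = greedy (g :: gs) (bs.drop j) := by
  induction hd : j - k generalizing k with
  | zero =>
    have : k = j := by omega
    subst this; rfl
  | succ n ih =>
    have hk : k < bs.length := by omega
    have hdrop : bs.drop k = bs[k] :: bs.drop (k + 1) := List.drop_eq_getElem_cons hk
    have hlt : bs[k] < g := hsmall k (le_refl _) (by omega) hk
    rw [hdrop]
    show greedy (g :: gs) (bs[k] :: bs.drop (k + 1)) = _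
    rw [greedy, if_neg (by omega)]
    exact ih (k + 1) (by omega) (fun t h1 h2 h3 => hsmall t (by omega) h2 h3) (by omega)

-- A's outer fold computes greedy, provided the goods are processed in nondecreasing order
theorem a_fold_eq_greedy (bs : List Int) (gs : List Int) (li : List Int) (k : Nat)
    (hsorted : gs.Pairwise (· ≤ ·)) :
    (gs.foldl (fun (st : List Int × Nat) g =>
      match findFrom g bs st.2 with
      | some j => (st.1 ++ [g], j + 1)
      | none => st) (li, k)).1.length = li.length + greedy gs (bs.drop k) := by
  induction gs generalizing li k with
  | nil => simp [greedy_nil_left]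
  | cons g gs ih =>
    rw [List.pairwise_cons] at hsorted
    obtain ⟨hg, hgs⟩ := hsorted
    simp only [List.foldl_cons]
    cases hff : findFrom g bs k with
    | some j =>
      obtain ⟨hkj, hjlen, hle, hsmall⟩ := findFrom_some g bs k j hff
      have hdropj : bs.drop j = bs[j] :: bs.drop (j + 1) := List.drop_eq_getElem_cons hjlen
      rw [greedy_drop_small g gs bs k j hkj (by omega) hsmall, hdropj]
      show _ = li.length + greedy (g :: gs) (bs[j] :: bs.drop (j + 1))
      rw [greedy, if_pos hle]
      rw [ih (li ++ [g]) (j + 1) hgs]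
      simp; omega
    | none =>
      have hsmall := findFrom_none_lt g bs k hff
      have hall : greedy (g :: gs) (bs.drop k) = 0 := by
        by_cases hk : k ≤ bs.length
        · rw [greedy_drop_small g gs bs k bs.length hk (le_refl _)
            (fun t h1 h2 h3 => hsmall t h1 h3)]
          rw [List.drop_length, greedy_nil_right]
        · rw [List.drop_eq_nil_of_le (by omega)]
          rfl
      rw [hall]
      -- every remaining good also fails: it is ≥ g and all boxes from k are < g
      have hrest : ∀ (gs' : List Int), (∀ x ∈ gs', g ≤ x) → ∀ (li' : List Int),
          (gs'.foldl (fun (st : List Int × Nat) g' =>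
            match findFrom g' bs st.2 with
            | some j => (st.1 ++ [g'], j + 1)
            | none => st) (li', k)).1.length = li'.length := by
        intro gs'
        induction gs' with
        | nil => intro _ li'; simp
        | cons x xs ihx =>
          intro hge li'
          have hxnone : findFrom x bs k = none := by
            cases hfx : findFrom x bs k with
            | none => rfl
            | some i =>
              obtain ⟨h1, h2, h3, _⟩ := findFrom_some x bs k i hfx
              have := hsmall i h1 h2
              have := hge x (List.mem_cons_self)
              omega
          simp only [List.foldl_cons, hxnone]
          exact ihx (fun y hy => hge y (List.mem_cons_of_mem _ hy)) li'
      rw [hrest gs hg li]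
      omega

-- ===== VERDICT (by name: the statement is the Claim_ definition above) =====
theorem solution_spec : Claim_equal_solution := by
  intro goods boxes _
  unfold Spec_solution solution solution_alt
  rw [alt_fold_eq_greedy, a_fold_eq_greedy _ _ _ _
    (by simpa using PySem.List.sorted_pairwise (xs := goods) (key := fun x : Int => x))]
  simp
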